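-- pv_equiv track=rewrite | github.com/sudozid/WireProxy_SurfShark_GUI | main.py | process_servers
-- ===== SOURCE A (Python) =====
-- from typing import Dict, List, Optional, Any
--
-- def process_servers(servers: List[Dict[str, Any]]) -> List[str]:
--     """Process server data into dropdown options"""
--     countries = {}
--     for server in servers:
--         country = server['country']
--         location = server['location']
--
--         if country not in countries:
--             countries[country] = set()
--
--         countries[country].add(location)
--
--     # Create dropdown options
--     country_options = []
--     for country in sorted(countries.keys()):
--         locations = sorted(countries[country])
--
--         if len(locations) == 1:
--             country_options.append(country)
--         else:
--             country_options.append(country)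
--             for location in locations:
--                 country_options.append(f"{country} - {location}")
--
--     return country_options
-- ===== SOURCE B (Python) =====
-- def process_servers(servers):
--     """Process server data into dropdown options"""
--     # One deduplicated set of (country, location) pairs instead of a dict of sets;
--     # each country's locations are recovered by filtering that set.
--     pairs = {(s['country'], s['location']) for s in servers}
--
--     options = []
--     for country in sorted({c for c, _ in pairs}):
--         locations = sorted({l for c, l in pairs if c == country})
--         if len(locations) == 1:
--             options.append(country)
--         else:
--             options.append(country)
--             options.extend(f"{country} - {l}" for l in locations)
--     return options
-- ===== Notes on version B (the rewrite author's own statement) =====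
-- stated objective: alternative
-- what changed: Replaces the incrementally built dict-of-sets with a single deduplicated set of (country, location) pairs; the sorted country list and each country's sorted locations are derived from that one set by projection/filtering instead of keyed mutation.
import Mathlib
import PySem

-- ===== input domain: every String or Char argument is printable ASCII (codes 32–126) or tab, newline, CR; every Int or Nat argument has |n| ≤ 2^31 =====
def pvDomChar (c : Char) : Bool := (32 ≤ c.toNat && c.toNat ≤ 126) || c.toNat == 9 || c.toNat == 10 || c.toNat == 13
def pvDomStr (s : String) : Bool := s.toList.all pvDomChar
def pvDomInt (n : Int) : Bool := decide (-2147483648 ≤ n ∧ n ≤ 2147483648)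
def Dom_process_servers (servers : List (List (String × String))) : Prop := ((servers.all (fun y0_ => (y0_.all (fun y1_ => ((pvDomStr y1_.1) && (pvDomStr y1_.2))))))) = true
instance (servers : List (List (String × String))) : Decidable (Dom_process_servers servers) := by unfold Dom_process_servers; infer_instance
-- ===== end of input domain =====

-- B replaces A's dict-of-sets grouping with one deduplicated set of (country, location)
-- pairs, filtered per country (alternative decomposition; no speed claim).

-- shared accessor: server['country'], server['location'] (none = KeyError, excluded by Pre_)
def pvKeyPair (server : List (String × String)) : Option (String × String) :=
  match (PySem.Dict.mk server).get? "country", (PySem.Dict.mk server).get? "location" with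
  | some c, some l => some (c, l)
  | _, _ => none

-- ===== PORT A =====
-- one iteration of A's first loop (servers with a missing key raise KeyError in Python;
-- they are excluded by Pre_, the port skips them)
def pvStepA (d : PySem.Dict String (PySem.Set String)) (server : List (String × String)) :
    PySem.Dict String (PySem.Set String) :=
  match pvKeyPair server with
  | none => d
  | some (country, location) =>
    let d1 := if d.contains country then d else d.insert country PySem.Set.empty
    d1.insert country (PySem.Set.add (d1.getD country PySem.Set.empty) location)

def process_servers (servers : List (List (String × String))) : List String :=
  let countries := servers.foldl pvStepA PySem.Dict.empty
  (PySem.List.sorted countries.keys (fun x => x) false).foldl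
    (fun country_options country =>
      let locations := PySem.List.sorted (countries.getD country PySem.Set.empty) (fun x => x) false
      if locations.length == 1 then
        country_options ++ [country]
      else
        locations.foldl (fun acc location => acc ++ [country ++ " - " ++ location])
          (country_options ++ [country])) []

-- ===== PORT B =====
def process_servers_alt (servers : List (List (String × String))) : List String :=
  let pairs : PySem.Set (String × String) := PySem.Set.ofList (servers.filterMap pvKeyPair)
  (PySem.List.sorted (PySem.Set.ofList (pairs.map Prod.fst)) (fun x => x) false).foldl
    (fun options country =>
      let locations := PySem.List.sorted
        (PySem.Set.ofList ((pairs.filter (fun p => p.1 == country)).map Prod.snd)) (fun x => x) false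
      if locations.length == 1 then
        options ++ [country]
      else
        (options ++ [country]) ++ locations.map (fun l => country ++ " - " ++ l)) []

-- ===== PRECONDITION & SPEC =====
-- Pre_ excludes exactly the inputs where Python A raises KeyError: a server dict
-- missing the 'country' or 'location' key.
def Pre_process_servers (servers : List (List (String × String))) : Prop :=
  (servers.all (fun s => (PySem.Dict.mk s).contains "country" && (PySem.Dict.mk s).contains "location")) = true
instance (servers : List (List (String × String))) : Decidable (Pre_process_servers servers) := by
  unfold Pre_process_servers; infer_instance

def pvWitness_process_servers : (List (List (String × String))) :=
  [[("country", "DE"), ("location", "Berlin")], [("country", "DE"), ("location", "Munich")]]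

def Spec_process_servers (servers : List (List (String × String))) (out : List String) : Prop :=
  out = process_servers_alt servers
instance (servers : List (List (String × String))) (out : List String) :
    Decidable (Spec_process_servers servers out) := by unfold Spec_process_servers; infer_instance

-- ===== CLAIM (what is proved, stated in full; the proofs are below) =====
def Claim_equal_process_servers : Prop := ∀ (servers : List (List (String × String))), Dom_process_servers servers → Pre_process_servers servers → Spec_process_servers servers (process_servers servers)

-- ===== LEMMAS AND PROOFS =====

theorem stepA_keys (d : PySem.Dict String (PySem.Set String)) (s : List (String × String))
    (c l0 : String) (h : pvKeyPair s = some (c, l0)) :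
    (pvStepA d s).keys = PySem.Set.add d.keys c := by
  unfold pvStepA
  rw [h]
  by_cases hc : d.contains c = true
  · simp only [hc, if_true, PySem.Set.add]
    rw [PySem.Dict.keys_insert_of_contains _ _ hc]
    have hmem : c ∈ d.keys := (PySem.Dict.contains_iff_mem_keys d c).mp hc
    simp [PySem.Set.contains, hmem]
  · have hc' : d.contains c = false := by simpa using hc
    have hmem : c ∉ d.keys := fun hm => by
      simp [(PySem.Dict.contains_iff_mem_keys d c).mpr hm] at hc'
    simp only [hc', if_false, Bool.false_eq_true]
    rw [PySem.Dict.keys_insert_of_contains _ _ (PySem.Dict.contains_insert_self _ _ _),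
      PySem.Dict.keys_insert_of_not_contains _ _ hc']
    simp [PySem.Set.add, PySem.Set.contains, hmem]

theorem stepA_getD (d : PySem.Dict String (PySem.Set String)) (s : List (String × String))
    (c l0 c' : String) (h : pvKeyPair s = some (c, l0)) :
    (pvStepA d s).getD c' PySem.Set.empty =
      if c' = c then PySem.Set.add (d.getD c PySem.Set.empty) l0
      else d.getD c' PySem.Set.empty := by
  unfold pvStepA
  rw [h]
  by_cases hc : d.contains c = true
  · simp [hc, PySem.Dict.getD_insert]
  · have hc' : d.contains c = false := by simpa using hc
    simp [hc', PySem.Dict.getD_insert, PySem.Dict.getD_of_not_contains _ _ hc', PySem.Set.add,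
      PySem.Set.empty, PySem.Set.contains]
    split_ifs <;> rfl

theorem foldA_keys (l : List (List (String × String))) (d : PySem.Dict String (PySem.Set String)) :
    (l.foldl pvStepA d).keys = PySem.Set.update d.keys ((l.filterMap pvKeyPair).map Prod.fst) := by
  induction l generalizing d with
  | nil => simp [PySem.Set.update]
  | cons s t ih =>
    cases h : pvKeyPair s with
    | none =>
      have hs : pvStepA d s = d := by unfold pvStepA; rw [h]
      simp only [List.foldl_cons, List.filterMap_cons, h, hs]
      exact ih d
    | some p =>
      obtain ⟨c, l0⟩ := p
      simp only [List.foldl_cons, List.filterMap_cons, h, List.map_cons]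
      rw [ih, stepA_keys d s c l0 h]
      simp [PySem.Set.update]

theorem foldA_getD (l : List (List (String × String))) (d : PySem.Dict String (PySem.Set String))
    (c : String) :
    (l.foldl pvStepA d).getD c PySem.Set.empty =
      PySem.Set.update (d.getD c PySem.Set.empty)
        (((l.filterMap pvKeyPair).filter (fun p => p.1 == c)).map Prod.snd) := by
  induction l generalizing d with
  | nil => simp [PySem.Set.update]
  | cons s t ih =>
    cases h : pvKeyPair s with
    | none =>
      have hs : pvStepA d s = d := by unfold pvStepA; rw [h]
      simp only [List.foldl_cons, List.filterMap_cons, h, hs]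
      exact ih d
    | some p =>
      obtain ⟨c0, l0⟩ := p
      simp only [List.foldl_cons, List.filterMap_cons, h, List.filter_cons]
      by_cases hcc : c0 = c
      · subst hcc
        simp only [beq_self_eq_true, if_true, List.map_cons]
        rw [ih, stepA_getD d s c0 l0 c0 h]
        simp [PySem.Set.update]
      · have : ((c0, l0).1 == c) = false := by simpa using hcc
        simp only [this, Bool.false_eq_true, if_false]
        rw [ih, stepA_getD d s c0 l0 c h]
        simp [Ne.symm hcc]

-- sorted(set(xs)) depends only on the members of xs
theorem sorted_ofList_congr {α : Type} [BEq α] [LawfulBEq α] [LinearOrder α]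
    (xs ys : List α) (h : ∀ a, a ∈ xs ↔ a ∈ ys) :
    PySem.List.sorted (PySem.Set.ofList xs) (fun x => x) false =
      PySem.List.sorted (PySem.Set.ofList ys) (fun x => x) false := by
  apply PySem.List.sorted_eq_sorted_of_perm _ _ _ (fun a b hab => hab)
  rw [List.perm_ext_iff_of_nodup (PySem.Set.nodup_ofList xs) (PySem.Set.nodup_ofList ys)]
  intro a
  simp [PySem.Set.mem_ofList, h a]

theorem process_servers_eq_alt (servers : List (List (String × String))) :
    process_servers servers = process_servers_alt servers := by
  simp only [process_servers, process_servers_alt]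
  set P := servers.filterMap pvKeyPair with hP
  have hkeys : (servers.foldl pvStepA PySem.Dict.empty).keys = PySem.Set.ofList (P.map Prod.fst) := by
    rw [foldA_keys]
    simp [PySem.Set.update, PySem.Set.ofList_eq_foldl, PySem.Dict.keys_empty]
    rw [← hP]
  have hsortedKeys :
      PySem.List.sorted (servers.foldl pvStepA PySem.Dict.empty).keys (fun x => x) false =
        PySem.List.sorted (PySem.Set.ofList ((PySem.Set.ofList P).map Prod.fst)) (fun x => x) false := by
    rw [hkeys]
    apply sorted_ofList_congr
    intro a
    simp [PySem.Set.mem_ofList]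
  have hloc : ∀ c : String,
      PySem.List.sorted ((servers.foldl pvStepA PySem.Dict.empty).getD c PySem.Set.empty)
        (fun x => x) false =
      PySem.List.sorted
        (PySem.Set.ofList (((PySem.Set.ofList P).filter (fun p => p.1 == c)).map Prod.snd))
        (fun x => x) false := by
    intro c
    rw [foldA_getD]
    have : PySem.Set.update ((PySem.Dict.empty : PySem.Dict String (PySem.Set String)).getD c PySem.Set.empty)
        ((P.filter (fun p => p.1 == c)).map Prod.snd)
        = PySem.Set.ofList ((P.filter (fun p => p.1 == c)).map Prod.snd) := by
      simp [PySem.Set.update, PySem.Set.ofList_eq_foldl, PySem.Set.empty]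
    rw [this]
    apply sorted_ofList_congr
    intro a
    constructor
    · rintro ha
      simp only [List.mem_map, List.mem_filter] at ha ⊢
      obtain ⟨p, ⟨hp, hpc⟩, hpa⟩ := ha
      exact ⟨p, ⟨(PySem.Set.mem_ofList _ _).mpr hp, hpc⟩, hpa⟩
    · rintro ha
      simp only [List.mem_map, List.mem_filter] at ha ⊢
      obtain ⟨p, ⟨hp, hpc⟩, hpa⟩ := ha
      exact ⟨p, ⟨(PySem.Set.mem_ofList _ _).mp hp, hpc⟩, hpa⟩
  rw [hsortedKeys]
  refine PySem.List.foldl_congr_mem _ _ _ _ ?_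
  intro acc c _
  rw [hloc c]
  by_cases h1 :
      (PySem.List.sorted
        (PySem.Set.ofList (((PySem.Set.ofList P).filter (fun p => p.1 == c)).map Prod.snd))
        (fun x => x) false).length = 1
  · simp [h1]
  · have h1' : ((PySem.List.sorted
        (PySem.Set.ofList (((PySem.Set.ofList P).filter (fun p => p.1 == c)).map Prod.snd))
        (fun x => x) false).length == 1) = false := by simpa using h1
    simp only [h1', Bool.false_eq_true, if_false]
    rw [PySem.List.foldl_append_singleton_eq_map]

-- ===== VERDICT (by name: the statement is the Claim_ definition above) =====
theorem process_servers_spec : Claim_equal_process_servers := by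
  intro servers _ _
  unfold Spec_process_servers
  exact process_servers_eq_alt servers
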